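-- pv_equiv track=rewrite | github.com/proSamik/DSA | 3.Recursion Assignment/pairStar.py | pairStar
-- ===== SOURCE A (Python) =====
-- def pairStar(a,si,ei):
--
--     if si==ei:
--         return a[si]
--
--     if a[si] == a[si+1]:
--         smallOuptut = pairStar(a,si+1,ei)
--
--         pair = a[si] + "*"
--
--         return pair + smallOuptut
--     else:
--         smallOuptut = pairStar(a,si+1,ei)
--
--         return a[si] + smallOuptut
-- ===== SOURCE B (Python) =====
-- def pairStar(a, si, ei):
--     # iterative: explicit buffer instead of recursion/call stack
--     buf = []
--     for i in range(si, ei):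
--         buf.append(a[i])
--         if a[i] == a[i + 1]:
--             buf.append("*")
--     buf.append(a[ei])
--     return "".join(buf)
-- ===== Notes on version B (the rewrite author's own statement) =====
-- stated objective: alternative
-- what changed: Replaced the recursion (one stack frame per character, building the string back-to-front) by a single iterative loop over range(si, ei) that appends into an explicit list buffer and joins once.
import Mathlib
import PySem

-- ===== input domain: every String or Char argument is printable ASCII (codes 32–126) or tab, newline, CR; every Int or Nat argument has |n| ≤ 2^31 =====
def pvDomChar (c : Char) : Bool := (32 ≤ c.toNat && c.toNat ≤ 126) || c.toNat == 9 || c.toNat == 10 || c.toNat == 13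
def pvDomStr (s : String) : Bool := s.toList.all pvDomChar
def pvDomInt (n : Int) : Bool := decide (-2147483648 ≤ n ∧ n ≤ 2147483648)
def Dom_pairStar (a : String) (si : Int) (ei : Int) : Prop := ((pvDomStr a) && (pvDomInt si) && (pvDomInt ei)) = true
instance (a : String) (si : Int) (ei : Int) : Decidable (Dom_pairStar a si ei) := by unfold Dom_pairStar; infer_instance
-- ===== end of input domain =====

-- B replaces A's recursion by one iterative fold with an explicit buffer; equal return values on Pre_.


-- ===== PORT A =====
-- a[i] as a one-character List Char (none → [] only outside Pre_)
def pvChar (cs : List Char) (i : Int) : List Char := (PySem.List.pyGet? cs i).elim [] (fun c => [c])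

-- literal recursion of A; the fuel (ei - si).toNat only makes the recursion structural:
-- it runs out exactly when si > ei, where the Python recursion never returns (IndexError)
def pairStarAux (cs : List Char) (fuel : Nat) (si ei : Int) : List Char :=
  if si = ei then pvChar cs si
  else
    match fuel with
    | 0 => []
    | fuel + 1 =>
      if PySem.List.pyGet? cs si = PySem.List.pyGet? cs (si + 1) then
        (pvChar cs si ++ ['*']) ++ pairStarAux cs fuel (si + 1) ei
      else
        pvChar cs si ++ pairStarAux cs fuel (si + 1) ei

def pairStar (a : String) (si : Int) (ei : Int) : String :=
  String.ofList (pairStarAux a.toList (ei - si).toNat si ei)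

-- ===== PORT B =====
def pairStar_alt (a : String) (si : Int) (ei : Int) : String :=
  let cs := a.toList
  let buf := (PySem.List.pyRange si ei 1).foldl
    (fun acc i =>
      let acc' := acc ++ pvChar cs i
      if PySem.List.pyGet? cs i = PySem.List.pyGet? cs (i + 1) then acc' ++ ['*'] else acc') []
  String.ofList (buf ++ pvChar cs ei)

-- ===== PRECONDITION & SPEC =====
-- exactly the inputs where the Python A returns: a well-formed (possibly negative-indexed) range
def Pre_pairStar (a : String) (si : Int) (ei : Int) : Prop :=
  si ≤ ei ∧ -(a.toList.length : Int) ≤ si ∧ ei < (a.toList.length : Int)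
instance (a : String) (si : Int) (ei : Int) : Decidable (Pre_pairStar a si ei) := by
  unfold Pre_pairStar; infer_instance
def pvWitness_pairStar : String × Int × Int := ("aabc", 0, 3)


def Spec_pairStar (a : String) (si : Int) (ei : Int) (out : String) : Prop := out = pairStar_alt a si ei
instance (a : String) (si : Int) (ei : Int) (out : String) : Decidable (Spec_pairStar a si ei out) := by unfold Spec_pairStar; infer_instance

-- ===== CLAIM (what is proved, stated in full; the proofs are below) =====
def Claim_equal_pairStar : Prop := ∀ (a : String) (si : Int) (ei : Int), Dom_pairStar a si ei → Pre_pairStar a si ei → Spec_pairStar a si ei (pairStar a si ei)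

-- ===== LEMMAS AND PROOFS =====
-- the loop of B, started from any accumulator, produces the accumulator followed by A's recursion
theorem foldl_eq_pairStarAux (cs : List Char) (ei : Int) :
    ∀ (fuel : Nat) (si : Int) (acc : List Char), si ≤ ei → ei - si ≤ (fuel : Int) →
      (PySem.List.pyRange si ei 1).foldl
        (fun acc i =>
          let acc' := acc ++ pvChar cs i
          if PySem.List.pyGet? cs i = PySem.List.pyGet? cs (i + 1) then acc' ++ ['*'] else acc') acc
        ++ pvChar cs ei
      = acc ++ pairStarAux cs fuel si ei := by
  intro fuel
  induction fuel with
  | zero =>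
    intro si acc hle hfuel
    have hsi : si = ei := by omega
    subst hsi
    rw [PySem.List.pyRange_one_eq_nil (le_refl si)]
    simp [pairStarAux]
  | succ fuel ih =>
    intro si acc hle hfuel
    by_cases hsi : si = ei
    · subst hsi
      rw [PySem.List.pyRange_one_eq_nil (le_refl si)]
      simp [pairStarAux]
    · have hlt : si < ei := by omega
      rw [PySem.List.pyRange_one_cons hlt]
      simp only [List.foldl_cons]
      rw [ih (si + 1) _ (by omega) (by omega)]
      conv_rhs => rw [pairStarAux]
      by_cases heq : PySem.List.pyGet? cs si = PySem.List.pyGet? cs (si + 1)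
      · simp [hsi, heq, List.append_assoc]
      · simp [hsi, heq, List.append_assoc]

-- ===== VERDICT (by name: the statement is the Claim_ definition above) =====
theorem pairStar_spec : Claim_equal_pairStar := by
  intro a si ei _ hpre
  unfold Spec_pairStar pairStar pairStar_alt
  have h := foldl_eq_pairStarAux a.toList ei (ei - si).toNat si [] hpre.1 (by omega)
  exact (congrArg String.ofList (h.trans (List.nil_append _))).symm
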